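-- pv_equiv track=rewrite | github.com/Bhargav-Kiku/Leetcode-Submissions | 3819-rotate-non-negative-elements/3819-rotate-non-negative-elements.py | rotateElements
-- ===== SOURCE A (Python) =====
-- from typing import List
--
-- def rotateElements(nums: List[int], k: int) -> List[int]:
--     ge = []
--     for i in nums:
--         if i >= 0:
--             ge.append(i)
--     n = len(nums)
--     m = len(ge)
--     j = 0
--     for i in range(n):
--         if nums[i] >= 0:
--             nums[i] = ge[(j + k) % m]
--             j += 1
--     return nums
-- ===== SOURCE B (Python) =====
-- from typing import List
--
-- def _gcd(a, b):
--     while b: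
--         a, b = b, a % b
--     return a
--
-- def rotateElements(nums: List[int], k: int) -> List[int]:
--     # In-place cycle-leader (juggling) rotation: move each non-negative value
--     # directly to its destination along gcd(r, m) index cycles; no rotated
--     # buffer of values is ever built.
--     pos = [i for i, x in enumerate(nums) if x >= 0]
--     m = len(pos)
--     if m == 0:
--         return nums
--     r = k % m
--     for s in range(_gcd(r, m)):
--         tmp = nums[pos[s]]
--         j = s
--         while (j + r) % m != s:
--             nums[pos[j]] = nums[pos[(j + r) % m]]
--             j = (j + r) % m
--         nums[pos[j]] = tmp
--     return nums
-- ===== Notes on version B (the rewrite author's own statement) =====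
-- stated objective: alternative
-- what changed: A extracts the non-negative values into a buffer and writes ge[(j+k)%m] back at each non-negative position with a running counter; B never builds a buffer of values: it records the non-negative positions and performs the rotation in place by the classic cycle-leader (juggling) algorithm, following gcd(k%m, m) index cycles and moving each value directly to its destination with O(1) extra values held.
import Mathlib
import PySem

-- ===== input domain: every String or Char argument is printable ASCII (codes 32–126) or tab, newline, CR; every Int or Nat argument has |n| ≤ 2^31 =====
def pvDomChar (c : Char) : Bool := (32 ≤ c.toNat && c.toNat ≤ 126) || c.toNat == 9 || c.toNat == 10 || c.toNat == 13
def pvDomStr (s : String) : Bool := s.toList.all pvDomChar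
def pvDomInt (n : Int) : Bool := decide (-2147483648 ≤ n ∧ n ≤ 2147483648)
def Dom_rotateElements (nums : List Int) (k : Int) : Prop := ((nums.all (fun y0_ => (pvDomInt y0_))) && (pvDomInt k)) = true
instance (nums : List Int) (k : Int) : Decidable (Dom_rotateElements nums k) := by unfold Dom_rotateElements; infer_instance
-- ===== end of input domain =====

-- B rotates the non-negative elements by the in-place cycle-leader (juggling) algorithm over
-- gcd(k % m, m) index cycles instead of A's buffer of extracted values plus per-position
-- modular lookup (objective: alternative, same O(n) cost). Both Pythons mutate `nums` in
-- place the same way; the equivalence proved here is about the RETURN value.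

-- ===== PORT A =====
-- literal transliteration of A: build ge by appending, then loop i in range(n),
-- rewriting nums[i] := ge[(j+k) % m] at each non-negative position.
def rotateElements (nums : List Int) (k : Int) : List Int :=
  let ge := nums.foldl (fun acc i => if i ≥ 0 then acc ++ [i] else acc) []
  let n : Int := (nums.length : Int)
  let m : Int := (ge.length : Int)
  ((PySem.List.pyRange 0 n).foldl
    (fun (st : List Int × Int) i =>
      if PySem.List.pyGetD st.1 i 0 ≥ 0 then
        (st.1.set i.toNat (PySem.List.pyGetD ge (PySem.Int.mod (st.2 + k) m) 0), st.2 + 1)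
      else st)
    (nums, 0)).1

-- ===== PORT B =====
-- helper _gcd of Source B: Euclid's loop `while b: a, b = b, a % b`
def pvGcd (a b : Nat) : Nat :=
  if h : b = 0 then a else pvGcd b (a % b)
termination_by b
decreasing_by exact Nat.mod_lt a (Nat.pos_of_ne_zero h)

-- the inner `while (j + r) % m != s` loop of one cycle, plus the final `nums[pos[j]] = tmp`
-- write; fuel m bounds the cycle length (the fuel-0 fallback performs the final write and is
-- never reached before the loop condition fails).
def pvJuggleCycle (pos : List Nat) (r m s : Nat) (tmp : Int) : Nat → Nat → List Int → List Int
  | j, 0, cur => cur.set (pos.getD j 0) tmp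
  | j, f+1, cur =>
      if (j + r) % m = s then cur.set (pos.getD j 0) tmp
      else pvJuggleCycle pos r m s tmp ((j + r) % m) f
             (cur.set (pos.getD j 0) (cur.getD (pos.getD ((j + r) % m) 0) 0))

def rotateElements_alt (nums : List Int) (k : Int) : List Int :=
  let pos := ((PySem.List.enumerate nums).filter (fun p => decide (p.2 ≥ 0))).map (fun p => p.1.toNat)
  let m := pos.length
  if m = 0 then nums
  else
    let r := (PySem.Int.mod k (m : Int)).toNat
    (List.range (pvGcd r m)).foldl
      (fun cur s => pvJuggleCycle pos r m s (cur.getD (pos.getD s 0) 0) s m cur) nums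

-- ===== PRECONDITION & SPEC =====
def Spec_rotateElements (nums : List Int) (k : Int) (out : List Int) : Prop := out = rotateElements_alt nums k
instance (nums : List Int) (k : Int) (out : List Int) : Decidable (Spec_rotateElements nums k out) := by unfold Spec_rotateElements; infer_instance

-- ===== CLAIM (what is proved, stated in full; the proofs are below) =====
def Claim_equal_rotateElements : Prop := ∀ (nums : List Int) (k : Int), Dom_rotateElements nums k → Spec_rotateElements nums k (rotateElements nums k)

-- ===== LEMMAS AND PROOFS =====

lemma pvGcd_eq (a b : Nat) : pvGcd a b = Nat.gcd b a := by
  fun_induction pvGcd with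
  | case1 a => simp
  | case2 a b h ih =>
    rw [ih]
    exact (Nat.gcd_rec b a).symm

/-! ### The list of non-negative positions -/

def posSpec : List Int → List Nat
  | [] => []
  | x :: xs => if x ≥ 0 then 0 :: (posSpec xs).map (· + 1) else (posSpec xs).map (· + 1)

lemma pvEnumPos (xs : List Int) : ∀ s : Nat,
    ((PySem.List.enumerate xs (s : Int)).filter (fun p => decide (p.2 ≥ 0))).map (fun p => p.1.toNat)
      = (posSpec xs).map (fun p => p + s) := by
  induction xs with
  | nil => intro s; simp [PySem.List.enumerate_nil, posSpec]
  | cons x xs ih =>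
    intro s
    rw [PySem.List.enumerate_cons]
    have hcast : (s : Int) + 1 = ((s + 1 : Nat) : Int) := by push_cast; ring
    have hcomp : ((fun p => p + s) ∘ (fun p => p + 1)) = fun p => p + (s + 1) := by
      funext p; simp; omega
    by_cases hx : x ≥ 0
    · rw [List.filter_cons, if_pos (by simp [hx]), List.map_cons, hcast, ih (s + 1)]
      simp only [posSpec, if_pos hx, List.map_cons, List.map_map, hcomp]
      simp
    · rw [List.filter_cons, if_neg (by simp [hx]), hcast, ih (s + 1)]
      simp only [posSpec, if_neg hx, List.map_map, hcomp]

lemma pvPosEq (nums : List Int) :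
    ((PySem.List.enumerate nums).filter (fun p => decide (p.2 ≥ 0))).map (fun p => p.1.toNat)
      = posSpec nums := by
  have := pvEnumPos nums 0
  simpa using this

lemma posSpec_length (xs : List Int) :
    (posSpec xs).length = (xs.filter (fun x => decide (x ≥ 0))).length := by
  induction xs with
  | nil => simp [posSpec]
  | cons x xs ih =>
    by_cases hx : x ≥ 0 <;> simp [posSpec, hx, List.filter_cons, ih]

lemma pvGetD_map_succ (ps : List Nat) (t : Nat) (h : t < ps.length) :
    (ps.map (· + 1)).getD t 0 = ps.getD t 0 + 1 := by
  rw [List.getD_eq_getElem _ _ (by simpa), List.getElem_map, List.getD_eq_getElem _ _ h]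

lemma posSpec_lt (xs : List Int) : ∀ t, t < (posSpec xs).length → (posSpec xs).getD t 0 < xs.length := by
  induction xs with
  | nil => simp [posSpec]
  | cons x xs ih =>
    intro t ht
    by_cases hx : x ≥ 0
    · simp only [posSpec, if_pos hx] at ht ⊢
      match t with
      | 0 => simp
      | t + 1 =>
        simp only [List.getD_cons_succ]
        have ht' : t < (posSpec xs).length := by simpa using ht
        rw [pvGetD_map_succ _ _ ht']
        have h2 := ih t ht'
        simp only [List.length_cons]
        omega
    · simp only [posSpec, if_neg hx] at ht ⊢
      have ht' : t < (posSpec xs).length := by simpa using ht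
      rw [pvGetD_map_succ _ _ ht']
      have h2 := ih t ht'
      simp only [List.length_cons]
      omega

lemma posSpec_val (xs : List Int) : ∀ t, t < (posSpec xs).length →
    xs.getD ((posSpec xs).getD t 0) 0 = (xs.filter (fun x => decide (x ≥ 0))).getD t 0 := by
  induction xs with
  | nil => simp [posSpec]
  | cons x xs ih =>
    intro t ht
    by_cases hx : x ≥ 0
    · simp only [posSpec, if_pos hx] at ht ⊢
      match t with
      | 0 => simp [List.filter_cons, decide_eq_true hx]
      | t + 1 =>
        have ht' : t < (posSpec xs).length := by simpa using ht
        simp only [List.getD_cons_succ]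
        rw [pvGetD_map_succ _ _ ht', List.getD_cons_succ]
        rw [List.filter_cons, if_pos (by simpa using hx), List.getD_cons_succ]
        exact ih t ht'
    · simp only [posSpec, if_neg hx] at ht ⊢
      have ht' : t < (posSpec xs).length := by simpa using ht
      rw [pvGetD_map_succ _ _ ht', List.getD_cons_succ]
      rw [List.filter_cons, if_neg (by simpa using hx)]
      exact ih t ht'

lemma posSpec_pairwise (xs : List Int) : (posSpec xs).Pairwise (· < ·) := by
  induction xs with
  | nil => simp [posSpec]
  | cons x xs ih =>
    by_cases hx : x ≥ 0
    · simp only [posSpec, if_pos hx, List.pairwise_cons]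
      refine ⟨?_, ?_⟩
      · intro y hy
        obtain ⟨p, _, rfl⟩ := List.mem_map.mp hy
        omega
      · rw [List.pairwise_map]
        exact ih.imp (by omega)
    · simp only [posSpec, if_neg hx]
      rw [List.pairwise_map]
      exact ih.imp (by omega)

lemma posSpec_nodup (xs : List Int) : (posSpec xs).Nodup :=
  (posSpec_pairwise xs).imp (fun h => Nat.ne_of_lt h)

/-! ### A's loop: reference rewrite and fill form (A-side characterisation) -/

-- reference rewrite: what A's index loop does to a suffix, counter j
def pvRewrite (ge : List Int) (k : Int) : List Int → Int → List Int
  | [], _ => []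
  | x :: xs, j =>
      if x ≥ 0 then
        PySem.List.pyGetD ge (PySem.Int.mod (j + k) (ge.length : Int)) 0 :: pvRewrite ge k xs (j + 1)
      else x :: pvRewrite ge k xs j

lemma pvFoldA (ge : List Int) (k : Int) :
    ∀ (suf pre : List Int) (j : Int),
      ((PySem.List.pyRange (pre.length : Int) ((pre.length + suf.length : Nat) : Int)).foldl
        (fun (st : List Int × Int) i =>
          if PySem.List.pyGetD st.1 i 0 ≥ 0 then
            (st.1.set i.toNat (PySem.List.pyGetD ge (PySem.Int.mod (st.2 + k) (ge.length : Int)) 0), st.2 + 1)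
          else st)
        (pre ++ suf, j)).1 = pre ++ pvRewrite ge k suf j := by
  intro suf
  induction suf with
  | nil =>
      intro pre j
      simp [pvRewrite, PySem.List.pyRange]
  | cons x xs ih =>
      intro pre j
      rw [PySem.List.pyRange_one_cons (by push_cast [List.length_cons]; omega)]
      simp only [List.foldl_cons]
      have hget : PySem.List.pyGetD (pre ++ x :: xs) ((pre.length : Nat) : Int) 0 = x := by
        simp [PySem.List.pyGetD_natCast]
      rw [hget]
      by_cases hx : x ≥ 0
      · rw [if_pos hx]
        have hset : (pre ++ x :: xs).set ((pre.length : Int)).toNat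
            (PySem.List.pyGetD ge (PySem.Int.mod (j + k) (ge.length : Int)) 0)
            = (pre ++ [PySem.List.pyGetD ge (PySem.Int.mod (j + k) (ge.length : Int)) 0]) ++ xs := by
          simp
        rw [hset]
        have := ih (pre ++ [PySem.List.pyGetD ge (PySem.Int.mod (j + k) (ge.length : Int)) 0]) (j + 1)
        have he1 : ((pre ++ [PySem.List.pyGetD ge (PySem.Int.mod (j + k) (ge.length : Int)) 0]).length : Int) = (pre.length : Int) + 1 := by simp
        have he2 : ((pre ++ [PySem.List.pyGetD ge (PySem.Int.mod (j + k) (ge.length : Int)) 0]).length + xs.length) = (pre.length + (x :: xs).length) := by simp; omega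
        rw [he1, he2] at this
        rw [this, pvRewrite, if_pos hx]
        simp
      · rw [if_neg hx]
        have := ih (pre ++ [x]) j
        have he1 : (((pre ++ [x]).length : Nat) : Int) = (pre.length : Int) + 1 := by simp
        have he2 : ((pre ++ [x]).length + xs.length) = (pre.length + (x :: xs).length) := by simp; omega
        rw [he1, he2, show (pre ++ [x]) ++ xs = pre ++ x :: xs by simp] at this
        rw [this, pvRewrite, if_neg hx]
        simp

-- fill: consume the next element of rot at each non-negative position
def pvFill : List Int → List Int → List Int
  | [], _ => []
  | x :: xs, rot =>
      if x ≥ 0 then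
        match rot with
        | r :: rs => r :: pvFill xs rs
        | [] => x :: pvFill xs rot
      else x :: pvFill xs rot

lemma pvFill_nil : ∀ xs : List Int, pvFill xs [] = xs := by
  intro xs
  induction xs with
  | nil => rfl
  | cons x xs ih => by_cases hx : x ≥ 0 <;> simp [pvFill, hx, ih]

lemma pvFillEq (ge : List Int) (k : Int) (rot : List Int) (hm : rot.length = ge.length)
    (hrot : ∀ j : Nat, j < ge.length →
      rot.getD j 0 = PySem.List.pyGetD ge (PySem.Int.mod ((j : Int) + k) (ge.length : Int)) 0) :
    ∀ (suf : List Int) (j : Nat),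
      j + (suf.filter (fun x => decide (x ≥ 0))).length ≤ ge.length →
      pvFill suf (rot.drop j) = pvRewrite ge k suf (j : Int) := by
  intro suf
  induction suf with
  | nil => intro j hj; simp [pvFill, pvRewrite]
  | cons x xs ih =>
      intro j hj
      by_cases hx : x ≥ 0
      · have hc : (List.filter (fun x => decide (x ≥ 0)) (x :: xs)).length
            = (List.filter (fun x => decide (x ≥ 0)) xs).length + 1 := by
          simp [hx]
        have hjlt : j < ge.length := by omega
        have hdrop : rot.drop j = rot[j]'(by omega) :: rot.drop (j + 1) :=
          List.drop_eq_getElem_cons (by omega)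
        have hval : rot[j]'(by omega)
            = PySem.List.pyGetD ge (PySem.Int.mod ((j : Int) + k) (ge.length : Int)) 0 := by
          rw [← hrot j hjlt]
          exact (List.getD_eq_getElem rot 0 (by omega)).symm
        rw [pvRewrite, if_pos hx, hdrop]
        simp only [pvFill, if_pos hx]
        rw [hval, ih (j + 1) (by omega)]
        push_cast
        ring_nf
      · rw [pvRewrite, if_neg hx]
        simp only [pvFill, if_neg hx]
        rw [ih j (by simpa [List.filter_cons, hx] using hj)]

lemma pvRotValNat (ge : List Int) (r : Nat) (hr : r < ge.length) :
    ∀ j : Nat, j < ge.length →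
      (ge.drop r ++ ge.take r).getD j 0 = ge.getD ((j + r) % ge.length) 0 := by
  intro j hj
  have hm : 0 < ge.length := by omega
  have hlen : (ge.drop r ++ ge.take r).length = ge.length := by simp; omega
  rw [List.getD_eq_getElem _ 0 (by omega), List.getD_eq_getElem _ 0 (Nat.mod_lt _ hm)]
  by_cases hcase : j < ge.length - r
  · have h1 : j < (ge.drop r).length := by simp only [List.length_drop]; omega
    have e1 : (j + r) % ge.length = r + j := by
      rw [Nat.mod_eq_of_lt (by omega)]; omega
    rw [List.getElem_append_left h1, List.getElem_drop]
    simp only [e1]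
  · have h1 : (ge.drop r).length ≤ j := by simp; omega
    have e2 : (j + r) % ge.length = j - (ge.length - r) := by
      rw [Nat.mod_eq_sub_mod (by omega), Nat.mod_eq_of_lt (by omega)]; omega
    rw [List.getElem_append_right h1, List.getElem_take]
    simp only [List.length_drop, e2]

lemma pvGeEq (nums : List Int) :
    nums.foldl (fun acc i => if i ≥ 0 then acc ++ [i] else acc) []
      = nums.filter (fun x => decide (x ≥ 0)) := by
  simpa using PySem.List.foldl_append_if (fun x : Int => decide (x ≥ 0)) id nums []

/-! ### scatter (write value list at position list) and the fill-scatter bridge -/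

def pvWriteAll (cur : List Int) (pvs : List (Nat × Int)) : List Int :=
  pvs.foldl (fun c pv => c.set pv.1 pv.2) cur

lemma pvWriteAll_nil_cur (pvs : List (Nat × Int)) : pvWriteAll [] pvs = [] := by
  induction pvs with
  | nil => rfl
  | cons p ps ih => simp [pvWriteAll, List.set_nil] at ih ⊢; exact ih

lemma pvWriteAll_shift (ps : List (Nat × Int)) : ∀ (c : Int) (cs : List Int),
    pvWriteAll (c :: cs) (ps.map (Prod.map (· + 1) id)) = c :: pvWriteAll cs ps := by
  induction ps with
  | nil => intro c cs; rfl
  | cons p ps ih =>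
    intro c cs
    simp only [List.map_cons, pvWriteAll, List.foldl_cons, Prod.map]
    rw [List.set_cons_succ]
    exact ih c (cs.set p.1 p.2)

lemma pvFill_eq_writeAll : ∀ (xs rot : List Int), pvFill xs rot = pvWriteAll xs ((posSpec xs).zip rot) := by
  intro xs
  induction xs with
  | nil => intro rot; simp [pvFill, pvWriteAll_nil_cur]
  | cons x xs ih =>
    intro rot
    by_cases hx : x ≥ 0
    · match rot with
      | [] =>
        simp only [posSpec, if_pos hx, pvFill, hx, List.zip_nil_right]
        simp [pvWriteAll, pvFill_nil]
      | v :: vs =>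
        simp only [posSpec, if_pos hx, pvFill, if_pos hx, List.zip_cons_cons]
        show v :: pvFill xs vs = pvWriteAll ((x :: xs).set 0 v) (((posSpec xs).map (· + 1)).zip vs)
        rw [List.set_cons_zero, List.zip_map_left, pvWriteAll_shift, ih]
    · simp only [posSpec, if_neg hx, pvFill, if_neg hx]
      rw [List.zip_map_left, pvWriteAll_shift, ih]

lemma pvWriteAll_length (pvs : List (Nat × Int)) : ∀ cur : List Int, (pvWriteAll cur pvs).length = cur.length := by
  induction pvs with
  | nil => intro cur; rfl
  | cons p ps ih => intro cur; simp [pvWriteAll, List.foldl_cons] at ih ⊢; rw [ih, List.length_set]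

lemma pvWriteAll_ne (pvs : List (Nat × Int)) : ∀ (cur : List Int) (i : Nat),
    (∀ pv ∈ pvs, pv.1 ≠ i) → (pvWriteAll cur pvs)[i]? = cur[i]? := by
  induction pvs with
  | nil => intro cur i _; rfl
  | cons p ps ih =>
    intro cur i h
    simp only [pvWriteAll, List.foldl_cons]
    rw [show (List.foldl (fun c pv => c.set pv.1 pv.2) (cur.set p.1 p.2) ps) = pvWriteAll (cur.set p.1 p.2) ps from rfl]
    rw [ih _ i (fun pv hpv => h pv (List.mem_cons_of_mem _ hpv))]
    rw [List.getElem?_set, if_neg (h p (List.mem_cons_self ..))]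

lemma pvWriteAll_get (ps : List Nat) : ∀ (vs cur : List Int) (t : Nat)
    (_ : ps.Nodup) (ht : t < ps.length) (htv : t < vs.length)
    (_ : ps.getD t 0 < cur.length),
    (pvWriteAll cur (ps.zip vs))[ps.getD t 0]? = some (vs.getD t 0) := by
  induction ps with
  | nil => intro vs cur t _ ht; simp at ht
  | cons p ps ih =>
    intro vs cur t hnd ht htv hlt
    match vs with
    | [] => simp at htv
    | v :: vs =>
      simp only [List.zip_cons_cons, pvWriteAll, List.foldl_cons]
      rw [show (List.foldl (fun c pv => c.set pv.1 pv.2) (cur.set p v) (ps.zip vs)) = pvWriteAll (cur.set p v) (ps.zip vs) from rfl]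
      match t with
      | 0 =>
        simp only [List.getD_cons_zero]
        rw [pvWriteAll_ne _ _ _ (fun pv hpv he => (List.nodup_cons.mp hnd).1
          (by rw [← he]; exact (List.of_mem_zip hpv).1))]
        rw [List.getElem?_set, if_pos rfl, if_pos (by simpa using hlt)]
      | t + 1 =>
        simp only [List.getD_cons_succ]
        exact ih vs (cur.set p v) t (List.nodup_cons.mp hnd).2 (by simpa using ht)
          (by simpa using htv) (by simpa using hlt)

/-! ### modular-arithmetic facts for the cycles -/

lemma pvModIff (r m s : Nat) (hm : 0 < m) (a b : Nat) :
    (s + a * r) % m = (s + b * r) % m ↔ a % (m / Nat.gcd r m) = b % (m / Nat.gcd r m) := by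
  constructor
  · intro h
    have h2 : a * r ≡ b * r [MOD m] := Nat.ModEq.add_left_cancel rfl h
    have h3 := Nat.ModEq.cancel_right_div_gcd hm h2
    rwa [Nat.gcd_comm m r] at h3
  · intro h
    have h2 := Nat.ModEq.mul_right' r (show a ≡ b [MOD m / Nat.gcd r m] from h)
    have hdvd : m ∣ m / Nat.gcd r m * r := by
      obtain ⟨u, hu⟩ := Nat.gcd_dvd_left r m
      obtain ⟨v, hv⟩ := Nat.gcd_dvd_right r m
      have hg : 0 < Nat.gcd r m := Nat.gcd_pos_of_pos_right r hm
      refine ⟨u, ?_⟩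
      have hv' : m / Nat.gcd r m = v := Nat.div_eq_of_eq_mul_left hg (hv.trans (Nat.mul_comm _ _))
      rw [hv']
      conv_rhs => rw [hv]
      conv_lhs => rw [hu]
      ring
    exact Nat.ModEq.add_left s (Nat.ModEq.of_dvd hdvd h2)

lemma pvModClass (r m s a : Nat) : ((s + a * r) % m) % Nat.gcd r m = s % Nat.gcd r m := by
  rw [Nat.mod_mod_of_dvd _ (Nat.gcd_dvd_right r m)]
  have hdvd : Nat.gcd r m ∣ a * r := Dvd.dvd.mul_left (Nat.gcd_dvd_left r m) a
  exact ((Nat.modEq_iff_dvd' (Nat.le_add_right s (a * r))).mpr (by simpa using hdvd)).symm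

lemma pvModSurj (r m s t : Nat) (hm : 0 < m) (ht : t < m)
    (hc : t % Nat.gcd r m = s % Nat.gcd r m) :
    ∃ a, a < m / Nat.gcd r m ∧ (s + a * r) % m = t := by
  have hg : 0 < Nat.gcd r m := Nat.gcd_pos_of_pos_right r hm
  have hL : 0 < m / Nat.gcd r m :=
    Nat.div_pos (Nat.le_of_dvd hm (Nat.gcd_dvd_right r m)) hg
  have hbez : (Nat.gcd r m : Int) = r * Nat.gcdA r m + m * Nat.gcdB r m := Nat.gcd_eq_gcd_ab r m
  have h1 : (t : Int) % (Nat.gcd r m : Int) = (s : Int) % (Nat.gcd r m : Int) := by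
    exact_mod_cast congrArg (fun x : Nat => (x : Int)) hc
  have hgd : (Nat.gcd r m : Int) ∣ ((t : Int) - s) :=
    (Int.ModEq.dvd (show (s : Int) ≡ t [ZMOD (Nat.gcd r m : Int)] from h1.symm))
  obtain ⟨e, he⟩ := hgd
  set x : Int := Nat.gcdA r m * e with hxdef
  have hmod : ((s : Int) + x * r) % m = (t : Int) % m := by
    have hdiff : (s : Int) + x * r - t = m * (-(Nat.gcdB r m * e)) := by
      rw [hxdef]
      linear_combination -he - e * hbez
    have : (t : Int) ≡ (s : Int) + x * r [ZMOD (m : Int)] :=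
      Int.modEq_iff_dvd.mpr ⟨-(Nat.gcdB r m * e), hdiff⟩
    exact this.symm
  have hm' : (0 : Int) < m := by exact_mod_cast hm
  set a0 : Nat := (x % m).toNat with ha0
  have hx : ((a0 : Nat) : Int) = x % m := Int.toNat_of_nonneg (Int.emod_nonneg x (by omega))
  have h2 : ((s : Int) + (a0 : Int) * r) % m = (t : Int) % m := by
    have hxm : ((a0 : Int) * r) % m = (x * r) % m := by
      conv_rhs => rw [Int.mul_emod x r]
      rw [hx, Int.mul_emod, Int.emod_emod_of_dvd x dvd_rfl]
    calc ((s : Int) + a0 * r) % m = ((s : Int) % m + (a0 * r : Int) % m) % m := by rw [Int.add_emod]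
      _ = ((s : Int) % m + (x * r) % m) % m := by rw [hxm]
      _ = ((s : Int) + x * r) % m := by rw [← Int.add_emod]
      _ = (t : Int) % m := hmod
  have hmodn : (s + a0 * r) % m = t := by
    have h3 : (((s + a0 * r) % m : Nat) : Int) = ((t % m : Nat) : Int) := by
      push_cast
      exact h2
    have h4 : (s + a0 * r) % m = t % m := by exact_mod_cast h3
    rw [h4, Nat.mod_eq_of_lt ht]
  refine ⟨a0 % (m / Nat.gcd r m), Nat.mod_lt _ hL, ?_⟩
  have := (pvModIff r m s hm (a0 % (m / Nat.gcd r m)) a0).mpr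
    (Nat.mod_mod_of_dvd a0 dvd_rfl)
  rw [this]
  exact hmodn

/-! ### getD/set helpers -/

lemma pvGetD_set_self (l : List Int) (i : Nat) (v : Int) (h : i < l.length) :
    (l.set i v).getD i 0 = v := by
  rw [List.getD_eq_getElem _ _ (by simpa using h)]
  simp [List.getElem_set_self]

lemma pvGetD_set_ne (l : List Int) (i j : Nat) (v : Int) (hne : i ≠ j) :
    (l.set i v).getD j 0 = l.getD j 0 := by
  rw [List.getD_eq_getElem?_getD, List.getD_eq_getElem?_getD, List.getElem?_set, if_neg hne]

/-! ### correctness of one cycle and of the outer loop -/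

lemma pvNodup_getD_inj (P : List Nat) (hnd : P.Nodup) (t j : Nat)
    (ht : t < P.length) (hj : j < P.length) (h : P.getD t 0 = P.getD j 0) : t = j := by
  rw [List.getD_eq_getElem _ _ ht, List.getD_eq_getElem _ _ hj] at h
  exact (List.Nodup.getElem_inj_iff hnd).mp h

-- the write that ends a cycle: after it, every rank in residue class s holds its final value
lemma pvFinalWrite (P : List Nat) (ge orig : List Int) (r m s : Nat)
    (hm : 0 < m) (hsg : s < Nat.gcd r m)
    (hPlen : P.length = m) (hPnd : P.Nodup)
    (hPlt : ∀ t, t < m → P.getD t 0 < orig.length)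
    (a : Nat) (cur : List Int)
    (hA : a + 1 = m / Nat.gcd r m)
    (hlen : cur.length = orig.length)
    (hoff : ∀ i, i ∉ P → cur[i]? = orig[i]?)
    (hcur : ∀ t, t < m → cur.getD (P.getD t 0) 0 =
        if t % Nat.gcd r m < s ∨ (∃ i, i < a ∧ (s + i * r) % m = t)
        then ge.getD ((t + r) % m) 0 else ge.getD t 0) :
    ((cur.set (P.getD ((s + a * r) % m) 0) (ge.getD s 0)).length = orig.length ∧
     (∀ i, i ∉ P → (cur.set (P.getD ((s + a * r) % m) 0) (ge.getD s 0))[i]? = orig[i]?) ∧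
     (∀ t, t < m → (cur.set (P.getD ((s + a * r) % m) 0) (ge.getD s 0)).getD (P.getD t 0) 0 =
        if t % Nat.gcd r m ≤ s then ge.getD ((t + r) % m) 0 else ge.getD t 0)) := by
  have hg : 0 < Nat.gcd r m := Nat.gcd_pos_of_pos_right r hm
  have hgm : Nat.gcd r m ≤ m := Nat.le_of_dvd hm (Nat.gcd_dvd_right r m)
  have hsm : s < m := lt_of_lt_of_le hsg hgm
  have hj : (s + a * r) % m < m := Nat.mod_lt _ hm
  have hjmem : P.getD ((s + a * r) % m) 0 ∈ P := by
    rw [List.getD_eq_getElem _ _ (by omega)]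
    exact List.getElem_mem _
  have hback : ((s + a * r) % m + r) % m = s := by
    rw [Nat.mod_add_mod, show s + a * r + r = s + (a + 1) * r by ring]
    have : (s + (a + 1) * r) % m = (s + 0 * r) % m := by
      rw [pvModIff r m s hm, hA]
      simp
    rw [this]
    simpa using Nat.mod_eq_of_lt hsm
  have hclass : ((s + a * r) % m) % Nat.gcd r m = s := by
    rw [pvModClass, Nat.mod_eq_of_lt hsg]
  refine ⟨by simpa using hlen, ?_, ?_⟩
  · intro i hi
    rw [List.getElem?_set, if_neg (fun he : P.getD ((s + a * r) % m) 0 = i => hi (he ▸ hjmem))]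
    exact hoff i hi
  · intro t htm
    by_cases hteq : t = (s + a * r) % m
    · subst hteq
      rw [pvGetD_set_self _ _ _ (by rw [hlen]; exact hPlt _ hj)]
      rw [if_pos (by rw [hclass])]
      rw [hback]
    · have hne : P.getD ((s + a * r) % m) 0 ≠ P.getD t 0 := by
        intro h
        exact hteq (pvNodup_getD_inj P hPnd t ((s + a * r) % m) (by omega) (by omega) h.symm)
      rw [pvGetD_set_ne _ _ _ _ hne, hcur t htm]
      rcases Nat.lt_trichotomy (t % Nat.gcd r m) s with hlt | heq | hgt
      · rw [if_pos (Or.inl hlt), if_pos (le_of_lt hlt)]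
      · -- residue class s: t was already written by an earlier iteration of this cycle
        obtain ⟨i, hiL, hieq⟩ := pvModSurj r m s t hm htm (by rw [heq, Nat.mod_eq_of_lt hsg])
        have hia : i < a := by
          rcases Nat.lt_or_ge i a with h' | h'
          · exact h'
          · exfalso
            have : i = a := by omega
            exact hteq (by rw [← hieq, this])
        rw [if_pos (Or.inr ⟨i, hia, hieq⟩), if_pos (le_of_eq heq)]
      · have hnot : ¬ (t % Nat.gcd r m < s ∨ ∃ i, i < a ∧ (s + i * r) % m = t) := by
          rintro (h' | ⟨i, _, hieq⟩)
          · omega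
          · rw [← hieq, pvModClass, Nat.mod_eq_of_lt hsg] at hgt
            omega
        rw [if_neg hnot, if_neg (by omega)]

lemma pvJuggleInner (P : List Nat) (ge orig : List Int) (r m s : Nat)
    (hm : 0 < m) (hsg : s < Nat.gcd r m)
    (hPlen : P.length = m) (hPnd : P.Nodup)
    (hPlt : ∀ t, t < m → P.getD t 0 < orig.length) :
    ∀ (f a : Nat) (cur : List Int),
      a < m / Nat.gcd r m → m / Nat.gcd r m ≤ f + a + 1 →
      cur.length = orig.length →
      (∀ i, i ∉ P → cur[i]? = orig[i]?) →
      (∀ t, t < m → cur.getD (P.getD t 0) 0 =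
          if t % Nat.gcd r m < s ∨ (∃ i, i < a ∧ (s + i * r) % m = t)
          then ge.getD ((t + r) % m) 0 else ge.getD t 0) →
      ((pvJuggleCycle P r m s (ge.getD s 0) ((s + a * r) % m) f cur).length = orig.length ∧
       (∀ i, i ∉ P → (pvJuggleCycle P r m s (ge.getD s 0) ((s + a * r) % m) f cur)[i]? = orig[i]?) ∧
       (∀ t, t < m → (pvJuggleCycle P r m s (ge.getD s 0) ((s + a * r) % m) f cur).getD (P.getD t 0) 0 =
          if t % Nat.gcd r m ≤ s then ge.getD ((t + r) % m) 0 else ge.getD t 0)) := by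
  intro f
  induction f with
  | zero =>
    intro a cur haL hfuel hlen hoff hcur
    have hA : a + 1 = m / Nat.gcd r m := by omega
    simpa only [pvJuggleCycle] using
      pvFinalWrite P ge orig r m s hm hsg hPlen hPnd hPlt a cur hA hlen hoff hcur
  | succ f ih =>
    intro a cur haL hfuel hlen hoff hcur
    have hg : 0 < Nat.gcd r m := Nat.gcd_pos_of_pos_right r hm
    have hgm : Nat.gcd r m ≤ m := Nat.le_of_dvd hm (Nat.gcd_dvd_right r m)
    have hsm : s < m := lt_of_lt_of_le hsg hgm
    have hj : (s + a * r) % m < m := Nat.mod_lt _ hm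
    have hnxt : ((s + a * r) % m + r) % m = (s + (a + 1) * r) % m := by
      rw [Nat.mod_add_mod, show s + a * r + r = s + (a + 1) * r by ring]
    by_cases hcond : ((s + a * r) % m + r) % m = s
    · have hA : a + 1 = m / Nat.gcd r m := by
        have h0 : (s + (a + 1) * r) % m = (s + 0 * r) % m := by
          rw [← hnxt, hcond]
          simp [Nat.mod_eq_of_lt hsm]
        have := (pvModIff r m s hm (a + 1) 0).mp h0
        rcases Nat.lt_or_ge (a + 1) (m / Nat.gcd r m) with h' | h'
        · rw [Nat.mod_eq_of_lt h', Nat.zero_mod] at this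
          omega
        · omega
      simp only [pvJuggleCycle, if_pos hcond]
      exact pvFinalWrite P ge orig r m s hm hsg hPlen hPnd hPlt a cur hA hlen hoff hcur
    · have hA1 : a + 1 < m / Nat.gcd r m := by
        rcases Nat.lt_or_ge (a + 1) (m / Nat.gcd r m) with h' | h'
        · exact h'
        · exfalso
          have hA : a + 1 = m / Nat.gcd r m := by omega
          apply hcond
          rw [hnxt]
          have h0 : (s + (a + 1) * r) % m = (s + 0 * r) % m := by
            rw [pvModIff r m s hm, hA]; simp
          rw [h0]
          simpa using Nat.mod_eq_of_lt hsm
      have hnxtm : (s + (a + 1) * r) % m < m := Nat.mod_lt _ hm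
      have hnxtval : cur.getD (P.getD ((s + (a + 1) * r) % m) 0) 0 = ge.getD ((s + (a + 1) * r) % m) 0 := by
        rw [hcur _ hnxtm, if_neg]
        rintro (h' | ⟨i, hia, hieq⟩)
        · rw [pvModClass, Nat.mod_eq_of_lt hsg] at h'; omega
        · have := (pvModIff r m s hm i (a + 1)).mp (hieq.trans rfl)
          rw [Nat.mod_eq_of_lt (by omega), Nat.mod_eq_of_lt hA1] at this
          omega
      set cur₂ := cur.set (P.getD ((s + a * r) % m) 0) (cur.getD (P.getD ((s + (a + 1) * r) % m) 0) 0) with hcur₂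
      have hstep : pvJuggleCycle P r m s (ge.getD s 0) ((s + a * r) % m) (f + 1) cur
          = pvJuggleCycle P r m s (ge.getD s 0) ((s + (a + 1) * r) % m) f cur₂ := by
        rw [pvJuggleCycle]
        rw [if_neg hcond, hnxt]
      rw [hstep]
      have hjmem : P.getD ((s + a * r) % m) 0 ∈ P := by
        rw [List.getD_eq_getElem _ _ (by omega)]
        exact List.getElem_mem _
      refine ih (a + 1) cur₂ hA1 (by omega) (by simp [hcur₂, hlen]) ?_ ?_
      · intro i hi
        rw [hcur₂, List.getElem?_set, if_neg (fun he : P.getD ((s + a * r) % m) 0 = i => hi (he ▸ hjmem))]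
        exact hoff i hi
      · intro t htm
        by_cases hteq : t = (s + a * r) % m
        · subst hteq
          rw [hcur₂, pvGetD_set_self _ _ _ (by rw [hlen]; exact hPlt _ hj), hnxtval,
            if_pos (Or.inr ⟨a, by omega, rfl⟩), hnxt]
        · have hne : P.getD ((s + a * r) % m) 0 ≠ P.getD t 0 := by
            intro h
            exact hteq (pvNodup_getD_inj P hPnd t ((s + a * r) % m) (by omega) (by omega) h.symm)
          rw [hcur₂, pvGetD_set_ne _ _ _ _ hne, hcur t htm]
          congr 1
          simp only [eq_iff_iff]
          constructor
          · rintro (h' | ⟨i, hia, hieq⟩)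
            · exact Or.inl h'
            · exact Or.inr ⟨i, by omega, hieq⟩
          · rintro (h' | ⟨i, hia, hieq⟩)
            · exact Or.inl h'
            · refine Or.inr ⟨i, ?_, hieq⟩
              rcases Nat.lt_or_ge i a with h'' | h''
              · exact h''
              · exfalso
                have : i = a := by omega
                exact hteq (by rw [← hieq, this])

lemma pvJuggleOuter (P : List Nat) (ge orig : List Int) (r m : Nat)
    (hm : 0 < m)
    (hPlen : P.length = m) (hPnd : P.Nodup)
    (hPlt : ∀ t, t < m → P.getD t 0 < orig.length)
    (hval : ∀ t, t < m → orig.getD (P.getD t 0) 0 = ge.getD t 0) :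
    ∀ s, s ≤ Nat.gcd r m →
      (((List.range s).foldl (fun cur s' => pvJuggleCycle P r m s' (cur.getD (P.getD s' 0) 0) s' m cur) orig).length = orig.length ∧
       (∀ i, i ∉ P → ((List.range s).foldl (fun cur s' => pvJuggleCycle P r m s' (cur.getD (P.getD s' 0) 0) s' m cur) orig)[i]? = orig[i]?) ∧
       (∀ t, t < m → ((List.range s).foldl (fun cur s' => pvJuggleCycle P r m s' (cur.getD (P.getD s' 0) 0) s' m cur) orig).getD (P.getD t 0) 0 =
          if t % Nat.gcd r m < s then ge.getD ((t + r) % m) 0 else ge.getD t 0)) := by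
  intro s
  induction s with
  | zero =>
    intro _
    refine ⟨rfl, fun i _ => rfl, ?_⟩
    intro t htm
    simp only [List.range_zero, List.foldl_nil, if_neg (Nat.not_lt_zero _)]
    exact hval t htm
  | succ s ih =>
    intro hs1
    have hsg : s < Nat.gcd r m := by omega
    have hg : 0 < Nat.gcd r m := by omega
    have hgm : Nat.gcd r m ≤ m := Nat.le_of_dvd hm (Nat.gcd_dvd_right r m)
    have hsm : s < m := lt_of_lt_of_le hsg hgm
    have hL : 0 < m / Nat.gcd r m :=
      Nat.div_pos (Nat.le_of_dvd hm (Nat.gcd_dvd_right r m)) hg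
    obtain ⟨ihlen, ihoff, ihval⟩ := ih (by omega)
    set F := (List.range s).foldl (fun cur s' => pvJuggleCycle P r m s' (cur.getD (P.getD s' 0) 0) s' m cur) orig with hF
    rw [List.range_succ, List.foldl_append, List.foldl_cons, List.foldl_nil]
    have htmp : F.getD (P.getD s 0) 0 = ge.getD s 0 := by
      rw [ihval s hsm, if_neg (by rw [Nat.mod_eq_of_lt hsg]; omega)]
    have hj0 : (s + 0 * r) % m = s := by simp [Nat.mod_eq_of_lt hsm]
    have hcur0 : ∀ t, t < m → F.getD (P.getD t 0) 0 =
        if t % Nat.gcd r m < s ∨ (∃ i, i < 0 ∧ (s + i * r) % m = t)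
        then ge.getD ((t + r) % m) 0 else ge.getD t 0 := by
      intro t htm
      rw [ihval t htm]
      congr 1
      simp
    have := pvJuggleInner P ge orig r m s hm hsg hPlen hPnd hPlt m 0 F hL
      (le_trans (Nat.div_le_self m _) (by omega)) ihlen ihoff hcur0
    rw [hj0] at this
    rw [htmp]
    obtain ⟨h1, h2, h3⟩ := this
    refine ⟨h1, h2, ?_⟩
    intro t htm
    rw [h3 t htm]
    congr 1
    simp only [eq_iff_iff]
    omega

/-! ### assembly -/

-- ===== VERDICT (by name: the statement is the Claim_ definition above) =====
theorem rotateElements_spec : Claim_equal_rotateElements := by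
  intro nums k _
  unfold Spec_rotateElements
  have hPl : (posSpec nums).length = (nums.filter (fun x => decide (x ≥ 0))).length :=
    posSpec_length nums
  have hA : rotateElements nums k = pvRewrite (nums.filter (fun x => decide (x ≥ 0))) k nums 0 := by
    unfold rotateElements
    rw [pvGeEq]
    simpa using pvFoldA (nums.filter (fun x => decide (x ≥ 0))) k nums [] 0
  by_cases hm0 : (posSpec nums).length = 0
  · -- no non-negative element: both sides return nums
    have hgenil : nums.filter (fun x => decide (x ≥ 0)) = [] :=
      List.length_eq_zero_iff.mp (by omega)
    have hBnil : rotateElements_alt nums k = nums := by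
      simp only [rotateElements_alt]
      rw [pvPosEq, if_pos hm0]
    rw [hA, hBnil, hgenil]
    have h1 := pvFillEq ([] : List Int) k [] rfl (fun j hj => absurd hj (by simp)) nums 0
      (by simp [hgenil])
    simpa [pvFill_nil] using h1.symm
  · have hm : 0 < (posSpec nums).length := Nat.pos_of_ne_zero hm0
    have hm' : (0 : Int) < ((posSpec nums).length : Int) := by exact_mod_cast hm
    set r := (PySem.Int.mod k ((posSpec nums).length : Int)).toNat with hrdef
    have hkr : PySem.Int.mod k ((posSpec nums).length : Int) = (r : Int) :=
      (Int.toNat_of_nonneg (PySem.Int.mod_nonneg k hm')).symm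
    have hrlt : r < (posSpec nums).length := by
      have := PySem.Int.mod_lt k hm'
      omega
    have hrot : ∀ j : Nat, j < (nums.filter (fun x => decide (x ≥ 0))).length →
        ((nums.filter (fun x => decide (x ≥ 0))).drop r ++ (nums.filter (fun x => decide (x ≥ 0))).take r).getD j 0
          = PySem.List.pyGetD (nums.filter (fun x => decide (x ≥ 0)))
              (PySem.Int.mod ((j : Int) + k) (((nums.filter (fun x => decide (x ≥ 0))).length : Nat) : Int)) 0 := by
      intro j hj
      have hgel : (((nums.filter (fun x => decide (x ≥ 0))).length : Nat) : Int)
          = ((posSpec nums).length : Int) := by exact_mod_cast hPl.symm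
      have hmf' : (0 : Int) < (((nums.filter (fun x => decide (x ≥ 0))).length : Nat) : Int) := by
        rw [hgel]; exact hm'
      have hkr' : k % (((nums.filter (fun x => decide (x ≥ 0))).length : Nat) : Int) = (r : Int) := by
        rw [hgel, ← PySem.Int.mod_eq_emod_of_pos hm', hkr]
      have hmod : PySem.Int.mod ((j : Int) + k) (((nums.filter (fun x => decide (x ≥ 0))).length : Nat) : Int)
          = (((j + r) % (nums.filter (fun x => decide (x ≥ 0))).length : Nat) : Int) := by
        rw [PySem.Int.mod_eq_emod_of_pos hmf', Int.add_emod, hkr', Int.emod_add_emod]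
        norm_cast
      rw [hmod, PySem.List.pyGetD_natCast]
      exact pvRotValNat _ r (by omega) j hj
    have hAfill : rotateElements nums k
        = pvFill nums ((nums.filter (fun x => decide (x ≥ 0))).drop r ++ (nums.filter (fun x => decide (x ≥ 0))).take r) := by
      rw [hA]
      have h2 := pvFillEq (nums.filter (fun x => decide (x ≥ 0))) k
        ((nums.filter (fun x => decide (x ≥ 0))).drop r ++ (nums.filter (fun x => decide (x ≥ 0))).take r)
        (by simp only [List.length_append, List.length_drop, List.length_take]; omega)
        hrot nums 0 (by simp only [ge_iff_le, Nat.zero_add]; omega)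
      rw [List.drop_zero] at h2
      exact_mod_cast h2.symm
    have hBdef : rotateElements_alt nums k =
        (List.range (Nat.gcd r (posSpec nums).length)).foldl
          (fun cur s => pvJuggleCycle (posSpec nums) r (posSpec nums).length s
            (cur.getD ((posSpec nums).getD s 0) 0) s (posSpec nums).length cur) nums := by
      simp only [rotateElements_alt]
      rw [pvPosEq, if_neg hm0, pvGcd_eq, Nat.gcd_comm]
    obtain ⟨hJL, hJoff, hJfin⟩ := pvJuggleOuter (posSpec nums)
      (nums.filter (fun x => decide (x ≥ 0))) nums r (posSpec nums).length hm rfl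
      (posSpec_nodup nums) (fun t ht => posSpec_lt nums t ht) (fun t ht => posSpec_val nums t ht)
      (Nat.gcd r (posSpec nums).length) le_rfl
    rw [hAfill, pvFill_eq_writeAll, hBdef]
    refine List.ext_getElem?_iff.mpr fun i => ?_
    have hrotlen : ((nums.filter (fun x => decide (x ≥ 0))).drop r ++ (nums.filter (fun x => decide (x ≥ 0))).take r).length
        = (posSpec nums).length := by
      simp only [List.length_append, List.length_drop, List.length_take]
      omega
    by_cases hi : i < nums.length
    · by_cases hmem : i ∈ posSpec nums
      · obtain ⟨t, ht, hPt⟩ := List.mem_iff_getElem.mp hmem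
        have hredG : t % Nat.gcd r (posSpec nums).length < Nat.gcd r (posSpec nums).length :=
          Nat.mod_lt _ (Nat.gcd_pos_of_pos_right _ hm)
        have hPg : (posSpec nums).getD t 0 = i := by rw [List.getD_eq_getElem _ _ ht, hPt]
        have hW := pvWriteAll_get (posSpec nums)
          ((nums.filter (fun x => decide (x ≥ 0))).drop r ++ (nums.filter (fun x => decide (x ≥ 0))).take r)
          nums t (posSpec_nodup nums) ht (by omega) (by rw [hPg]; exact hi)
        rw [hPg] at hW
        rw [hW]
        have hJ := hJfin t ht
        rw [if_pos hredG, hPg] at hJ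
        have hiJ : i < ((List.range (Nat.gcd r (posSpec nums).length)).foldl
            (fun cur s => pvJuggleCycle (posSpec nums) r (posSpec nums).length s
              (cur.getD ((posSpec nums).getD s 0) 0) s (posSpec nums).length cur) nums).length := by
          rw [hJL]; exact hi
        rw [List.getElem?_eq_getElem hiJ]
        rw [← List.getD_eq_getElem _ 0 hiJ, hJ]
        rw [pvRotValNat _ r (by omega) t (by omega), hPl]
      · rw [pvWriteAll_ne _ _ _ (fun pv hpv he => hmem (by rw [← he]; exact (List.of_mem_zip hpv).1))]
        rw [hJoff i hmem]
    · rw [List.getElem?_eq_none (by rw [pvWriteAll_length]; omega),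
        List.getElem?_eq_none (by rw [hJL]; omega)]
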